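-- pv_equiv track=rewrite | github.com/ims510/pro_text_pause_prediction | bert_binary.py | get_binary_pause_labels
-- ===== SOURCE A (Python) =====
-- def get_binary_pause_labels(text):
--     words = text.split()
--     clean_tokens = []
--     labels = []
--
--     for word in words:
--         # Add cleaned word to the tokens (handling categories separately)
--         if "cat_" in word:
--             # If there's a category marker, we mark the previous word with a pause
--             if len(labels) > 0:  # Check that there is a previous word
--                 labels[-1] = 1  # Mark the previous word as followed by a pause
--         else:
--             clean_tokens.append(word)  # Add the actual word to clean tokens
--             labels.append(0)  # No pause by default after this word
--
--     # Ensure the label list and clean_tokens are aligned in length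
--     if len(clean_tokens) != len(labels):
--         raise ValueError("Mismatch between token length and label length.")
--
--     return clean_tokens, labels
-- ===== SOURCE B (Python) =====
-- def get_binary_pause_labels(text):
--     words = text.split()
--     nexts = words[1:] + [""]
--     clean_tokens = [w for w in words if "cat_" not in w]
--     labels = [1 if "cat_" in n else 0
--               for w, n in zip(words, nexts) if "cat_" not in w]
--     return clean_tokens, labels
-- ===== Notes on version B (the rewrite author's own statement) =====
-- stated objective: alternative
-- what changed: Replaces A's stateful loop that back-patches labels[-1] with two stateless comprehensions: a label is 1 exactly when the next word in the split contains the category marker, computed by zipping each word with its successor.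
import Mathlib
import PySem

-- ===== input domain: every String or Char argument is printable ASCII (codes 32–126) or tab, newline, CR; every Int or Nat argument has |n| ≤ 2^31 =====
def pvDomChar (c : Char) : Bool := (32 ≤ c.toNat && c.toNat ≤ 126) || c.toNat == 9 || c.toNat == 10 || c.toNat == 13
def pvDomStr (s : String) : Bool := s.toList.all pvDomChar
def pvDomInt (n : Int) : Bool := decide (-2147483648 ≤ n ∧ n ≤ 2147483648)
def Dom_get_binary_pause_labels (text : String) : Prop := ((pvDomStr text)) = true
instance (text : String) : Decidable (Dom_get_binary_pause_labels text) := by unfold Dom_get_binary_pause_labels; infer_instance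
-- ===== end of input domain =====

-- B replaces A's stateful loop with labels[-1] back-patching by stateless comprehensions over
-- each word zipped with its successor (objective: alternative; A's length-mismatch raise is
-- dead code, so A is total).

-- ===== PORT A =====
-- one loop iteration of A: back-patch labels[-1] on a category marker, else append word and 0
def pvAStep (st : List String × List Int) (word : String) : List String × List Int :=
  if PySem.Str.isIn "cat_" word then
    (st.1, if st.2.length > 0 then st.2.dropLast ++ [1] else st.2)
  else
    (st.1 ++ [word], st.2 ++ [0])

def get_binary_pause_labels (text : String) : List String × List Int :=
  let words := PySem.Str.split₀ text
  words.foldl pvAStep ([], [])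

-- ===== PORT B =====
def get_binary_pause_labels_alt (text : String) : List String × List Int :=
  let words := PySem.Str.split₀ text
  let nexts := words.drop 1 ++ [""]
  let clean_tokens := words.filter (fun w => !PySem.Str.isIn "cat_" w)
  let labels := ((words.zip nexts).filter (fun p => !PySem.Str.isIn "cat_" p.1)).map
      (fun p => if PySem.Str.isIn "cat_" p.2 then (1 : Int) else 0)
  (clean_tokens, labels)

-- ===== PRECONDITION & SPEC =====
def Spec_get_binary_pause_labels (text : String) (out : List String × List Int) : Prop := out = get_binary_pause_labels_alt text
instance (text : String) (out : List String × List Int) : Decidable (Spec_get_binary_pause_labels text out) := by unfold Spec_get_binary_pause_labels; infer_instance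

-- ===== CLAIM (what is proved, stated in full; the proofs are below) =====
def Claim_equal_get_binary_pause_labels : Prop := ∀ (text : String), Dom_get_binary_pause_labels text → Spec_get_binary_pause_labels text (get_binary_pause_labels text)

-- ===== LEMMAS AND PROOFS =====

-- 'set the last label to 1' as A performs it (identity on the empty list)
def pvSetLast (l : List Int) : List Int :=
  if l.length > 0 then l.dropLast ++ [1] else l

-- B's label list, as a function of the word list
def pvLabels (ws : List String) : List Int :=
  ((ws.zip (ws.drop 1 ++ [""])).filter (fun p => !PySem.Str.isIn "cat_" p.1)).map
    (fun p => if PySem.Str.isIn "cat_" p.2 then (1 : Int) else 0)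

-- does the word list start with a category marker?
def pvFirstCat (ws : List String) : Bool :=
  PySem.Str.isIn "cat_" (ws.headD "")

theorem pvSetLast_setLast (l : List Int) : pvSetLast (pvSetLast l) = pvSetLast l := by
  cases l using List.reverseRecOn <;> simp [pvSetLast]

theorem pvSetLast_append (l : List Int) (x : Int) : pvSetLast (l ++ [x]) = l ++ [1] := by
  simp [pvSetLast]

theorem pvLabels_cons (w : String) (ws : List String) :
    pvLabels (w :: ws) =
      (if PySem.Str.isIn "cat_" w then [] else
        [if pvFirstCat ws then (1 : Int) else 0]) ++ pvLabels ws := by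
  cases ws with
  | nil =>
    by_cases h : PySem.Str.isIn "cat_" w <;>
      simp [PySem.Str.isIn] at h <;>
      simp [pvLabels, pvFirstCat, h, PySem.Str.isIn]
  | cons v vs =>
    by_cases h : PySem.Str.isIn "cat_" w <;>
      simp [PySem.Str.isIn] at h <;>
      simp [pvLabels, pvFirstCat, h, PySem.Str.isIn]

-- main invariant: A's forward fold from any start state, against B's next-word labels
theorem pv_main (ws : List String) (t0 : List String) (l0 : List Int) :
    ws.foldl pvAStep (t0, l0) =
      (t0 ++ ws.filter (fun w => !PySem.Str.isIn "cat_" w),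
        (if pvFirstCat ws then pvSetLast l0 else l0) ++ pvLabels ws) := by
  induction ws generalizing t0 l0 with
  | nil =>
    simp [pvFirstCat, pvLabels, PySem.Str.isIn, PySem.Chars.isIn]
    intro hh
    exact absurd (by decide) hh
  | cons w ws ih =>
    by_cases h : PySem.Str.isIn "cat_" w
    · have hstep : pvAStep (t0, l0) w = (t0, pvSetLast l0) := by
        simp only [pvAStep, h, if_pos]; simp [pvSetLast]
      rw [List.foldl_cons, hstep, ih, pvLabels_cons]
      have h' : PySem.Chars.isIn ['c', 'a', 't', '_'] w.toList = true := by
        simpa [PySem.Str.isIn] using h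
      by_cases hp : pvFirstCat ws <;>
        simp [pvFirstCat, PySem.Str.isIn, h', pvSetLast_setLast] at *
    · have h' : PySem.Chars.isIn ['c', 'a', 't', '_'] w.toList = false := by
        simpa [PySem.Str.isIn] using h
      have hstep : pvAStep (t0, l0) w = (t0 ++ [w], l0 ++ [0]) := by
        simp [pvAStep, PySem.Str.isIn, h']
      rw [List.foldl_cons, hstep, ih, pvLabels_cons]
      simp [pvFirstCat, PySem.Str.isIn, h', pvSetLast_append]
      split <;> simp

-- ===== VERDICT (by name: the statement is the Claim_ definition above) =====
theorem get_binary_pause_labels_spec : Claim_equal_get_binary_pause_labels := by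
  intro text _
  unfold Spec_get_binary_pause_labels get_binary_pause_labels get_binary_pause_labels_alt
  rw [pv_main]
  cases h : pvFirstCat (PySem.Str.split₀ text) <;> simp [pvSetLast, pvLabels]
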